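-- pv_equiv track=rewrite | github.com/SDET-SOLOMAN/code_wars_python | kata_6s/zero_plantiful_arr.py | zero_plentiful3
-- ===== SOURCE A (Python) =====
-- def zero_plentiful3(arr):
--
--     zc = 0
--     t = 0
--
--     for i, c in enumerate(arr):
--
--         if c == 0:
--             zc += 1
--
--             if i == (len(arr) - 1) and zc >= 4:
--                 t += 1
--                 return t
--
--             elif i == len(arr) - 1 and zc:
--                 return 0
--
--         else:
--             if zc > 3:
--                 t += 1
--                 zc = 0
--             if zc > 0:
--                 return 0
--     return t
-- ===== SOURCE B (Python) =====
-- def zero_plentiful3(arr):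
--     # Pass 1: collect lengths of maximal zero-runs; pass 2: judge the runs.
--     runs = []
--     n = 0
--     for x in arr:
--         if x == 0:
--             n += 1
--         else:
--             if n:
--                 runs.append(n)
--             n = 0
--     if n:
--         runs.append(n)
--     if any(r < 4 for r in runs):
--         return 0
--     return len(runs)
-- ===== Notes on version B (the rewrite author's own statement) =====
-- stated objective: simpler
-- what changed: Replaces the flat index-by-index state machine with early returns and end-of-array index tests by a two-phase decomposition: first collect the lengths of maximal zero-runs, then return 0 if any run is shorter than 4, else the number of runs.
import Mathlib
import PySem

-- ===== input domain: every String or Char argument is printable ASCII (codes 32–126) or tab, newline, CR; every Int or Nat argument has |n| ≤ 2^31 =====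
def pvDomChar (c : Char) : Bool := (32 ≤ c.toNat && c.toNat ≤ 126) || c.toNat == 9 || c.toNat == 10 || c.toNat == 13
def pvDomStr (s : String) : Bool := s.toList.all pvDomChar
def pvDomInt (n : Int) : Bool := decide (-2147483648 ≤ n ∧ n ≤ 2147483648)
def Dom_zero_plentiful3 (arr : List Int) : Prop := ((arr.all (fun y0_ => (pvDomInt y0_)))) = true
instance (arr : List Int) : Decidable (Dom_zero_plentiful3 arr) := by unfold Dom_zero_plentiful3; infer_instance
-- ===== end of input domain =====

-- B replaces A's index-by-index state machine by a run-decomposition: collect zero-run lengths, then judge them (objective: simpler).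


-- ===== PORT A =====
-- literal port of A's `for i, c in enumerate(arr)` loop with its early returns;
-- the sequential `if zc > 3: t += 1; zc = 0` / `if zc > 0: return 0` mutations are rendered by branching
def zpLoopA (n : Int) (i : Int) (l : List Int) (zc t : Int) : Int :=
  match l with
  | [] => t
  | c :: rest =>
    if c = 0 then
      if i = n - 1 ∧ 4 ≤ zc + 1 then t + 1
      else if i = n - 1 ∧ zc + 1 ≠ 0 then 0
      else zpLoopA n (i + 1) rest (zc + 1) t
    else
      if zc > 3 then
        (if (0 : Int) > 0 then 0 else zpLoopA n (i + 1) rest 0 (t + 1))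
      else
        (if zc > 0 then 0 else zpLoopA n (i + 1) rest zc t)

def zero_plentiful3 (arr : List Int) : Int :=
  zpLoopA (arr.length : Int) 0 arr 0 0

-- ===== PORT B =====
-- one fold builds the list of maximal zero-run lengths (zpFinish flushes the pending run),
-- then the runs are judged: 0 if any run is shorter than 4, else the number of runs
def zpStep (s : List Int × Int) (x : Int) : List Int × Int :=
  if x = 0 then (s.1, s.2 + 1)
  else (if s.2 ≠ 0 then s.1 ++ [s.2] else s.1, 0)

def zpFinish (s : List Int × Int) : List Int :=
  if s.2 ≠ 0 then s.1 ++ [s.2] else s.1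

def zero_plentiful3_alt (arr : List Int) : Int :=
  let runs := zpFinish (arr.foldl zpStep ([], 0))
  if runs.any (fun r => r < 4) then 0 else (runs.length : Int)

-- ===== PRECONDITION & SPEC =====
def Spec_zero_plentiful3 (arr : List Int) (out : Int) : Prop := out = zero_plentiful3_alt arr
instance (arr : List Int) (out : Int) : Decidable (Spec_zero_plentiful3 arr out) := by unfold Spec_zero_plentiful3; infer_instance

-- ===== CLAIM (what is proved, stated in full; the proofs are below) =====
def Claim_equal_zero_plentiful3 : Prop := ∀ (arr : List Int), Dom_zero_plentiful3 arr → Spec_zero_plentiful3 arr (zero_plentiful3 arr)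

-- ===== LEMMAS AND PROOFS =====

-- zero-run lengths of l, with a pending open run of length n
def zpRuns (l : List Int) (n : Int) : List Int :=
  match l with
  | [] => if n ≠ 0 then [n] else []
  | x :: rest => if x = 0 then zpRuns rest (n + 1)
                 else (if n ≠ 0 then [n] else []) ++ zpRuns rest 0

theorem zpFold_runs (l : List Int) (acc : List Int) (n : Int) :
    zpFinish (l.foldl zpStep (acc, n)) = acc ++ zpRuns l n := by
  induction l generalizing acc n with
  | nil => by_cases hn : n = 0 <;> simp [zpFinish, zpRuns, hn]
  | cons x rest ih =>
    simp only [List.foldl]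
    by_cases hx : x = 0
    · rw [show zpStep (acc, n) x = (acc, n + 1) by simp [zpStep, hx], ih]
      simp [zpRuns, hx]
    · rw [show zpStep (acc, n) x = (if n ≠ 0 then acc ++ [n] else acc, 0) by simp [zpStep, hx], ih]
      by_cases hn : n = 0 <;> simp [zpRuns, hx, hn, List.append_assoc]

theorem zpLoopA_runs (n : Int) (l : List Int) :
    ∀ (i zc t : Int), i = n - l.length → 0 ≤ zc → (l = [] → zc = 0) →
    zpLoopA n i l zc t =
      (if (zpRuns l zc).any (fun r => r < 4) then 0 else t + ((zpRuns l zc).length : Int)) := by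
  induction l with
  | nil =>
    intro i zc t _ _ hnil
    simp [zpLoopA, zpRuns, hnil rfl]
  | cons c rest ih =>
    intro i zc t hi hzc hnil
    have hi' : i = n - ((rest.length : Int) + 1) := by rw [hi]; simp
    by_cases hc : c = 0
    · simp only [zpLoopA, if_pos hc]
      by_cases hlast : rest = []
      · subst hlast
        have hil : i = n - 1 := by simp at hi'; omega
        by_cases h4 : 4 ≤ zc + 1
        · rw [if_pos ⟨hil, h4⟩]
          simp [zpRuns, hc, show ¬(zc + 1 < 4) by omega, show zc + 1 ≠ 0 by omega]
        · rw [if_neg (fun h => h4 h.2), if_pos ⟨hil, by omega⟩]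
          simp [zpRuns, hc, show zc + 1 ≠ 0 by omega, show zc + 1 < 4 by omega]
      · have hrl : (1 : Int) ≤ rest.length := by
          cases rest with
          | nil => exact absurd rfl hlast
          | cons a b => simp
        have hil : ¬ i = n - 1 := by omega
        rw [if_neg (fun h => hil h.1), if_neg (fun h => hil h.1),
            ih (i + 1) (zc + 1) t (by omega) (by omega) (fun h => absurd h hlast)]
        simp [zpRuns, hc]
    · simp only [zpLoopA, if_neg hc]
      have hruns : zpRuns (c :: rest) zc = (if zc ≠ 0 then [zc] else []) ++ zpRuns rest 0 := by
        simp [zpRuns, hc]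
      rw [hruns]
      by_cases h3 : zc > 3
      · rw [if_pos h3, if_neg (by omega : ¬ (0 : Int) > 0),
            ih (i + 1) 0 (t + 1) (by omega) le_rfl (fun _ => rfl)]
        simp only [if_pos (show zc ≠ 0 by omega)]
        by_cases hA : (zpRuns rest 0).any (fun r => r < 4) <;>
          simp [hA, show ¬(zc < 4) by omega] <;> omega
      · rw [if_neg h3]
        by_cases hpos : zc > 0
        · rw [if_pos hpos]
          simp [show zc ≠ 0 by omega, show zc < 4 by omega]
        · have hz : zc = 0 := by omega
          subst hz
          rw [if_neg (by omega : ¬ (0 : Int) > 0),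
              ih (i + 1) 0 t (by omega) le_rfl (fun _ => rfl)]
          simp

-- ===== VERDICT (by name: the statement is the Claim_ definition above) =====
theorem zero_plentiful3_spec : Claim_equal_zero_plentiful3 := by
  intro arr _
  unfold Spec_zero_plentiful3 zero_plentiful3 zero_plentiful3_alt
  rw [show arr.foldl zpStep ([], 0) = arr.foldl zpStep (([] : List Int), (0 : Int)) from rfl]
  have hf := zpFold_runs arr [] 0
  rw [hf, List.nil_append,
      zpLoopA_runs (arr.length : Int) arr 0 0 0 (by omega) le_rfl (fun _ => rfl)]
  by_cases hA : (zpRuns arr 0).any (fun r => r < 4) <;> simp [hA]
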